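-- pv_equiv track=rewrite | github.com/xenia1w/MastersThesis | src/pipeline/speaker_stability.py | _numeric_sort_key
-- ===== SOURCE A (Python) =====
-- def _numeric_sort_key(name: str) -> tuple:
--     digits = ""
--     for ch in reversed(name):
--         if ch.isdigit():
--             digits = ch + digits
--         elif digits:
--             break
--     if digits:
--         return (name.rstrip(digits), int(digits))
--     return (name, -1)
-- ===== SOURCE B (Python) =====
-- def _numeric_sort_key(name: str) -> tuple:
--     # Forward scan: group maximal digit runs, then take the last run.
--     runs = []
--     cur = ""
--     for ch in name:
--         if ch.isdigit():
--             cur += ch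
--         else:
--             if cur:
--                 runs.append(cur)
--             cur = ""
--     if cur:
--         runs.append(cur)
--     if runs:
--         digits = runs[-1]
--         return (name.rstrip(digits), int(digits))
--     return (name, -1)
-- ===== Notes on version B (the rewrite author's own statement) =====
-- stated objective: alternative
-- what changed: A scans the string in reverse with an early break to collect the trailing-most digit run; B makes one forward pass that groups all maximal digit runs into a list and takes the last run, then branches identically (rstrip + int).
import Mathlib
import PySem

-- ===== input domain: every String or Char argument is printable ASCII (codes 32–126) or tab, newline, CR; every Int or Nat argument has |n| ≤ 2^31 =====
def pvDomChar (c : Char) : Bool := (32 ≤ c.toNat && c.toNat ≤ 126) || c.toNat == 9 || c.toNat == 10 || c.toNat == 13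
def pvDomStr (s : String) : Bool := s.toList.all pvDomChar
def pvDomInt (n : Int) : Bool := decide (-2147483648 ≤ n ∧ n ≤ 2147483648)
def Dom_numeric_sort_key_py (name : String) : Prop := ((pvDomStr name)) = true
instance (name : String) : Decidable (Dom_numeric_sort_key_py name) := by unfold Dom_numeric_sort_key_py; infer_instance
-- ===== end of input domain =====

-- B replaces A's reverse-scan-with-break by a forward single pass that groups maximal
-- digit runs and takes the last run (objective: alternative, same cost).


-- hand port of Python's s.rstrip(chars) (no PySem primitive for the char-set form):
-- drop trailing characters that occur in `chars`
def pvRstripChars (s : List Char) (chars : List Char) : List Char :=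
  ((s.reverse.dropWhile (fun c => chars.contains c)).reverse)

-- ===== PORT A =====
-- A's loop: for ch in reversed(name): if digit, prepend; elif digits nonempty, break; else continue
def pvARev (l : List Char) (digits : List Char) : List Char :=
  match l with
  | [] => digits
  | c :: rest =>
      if PySem.Chars.isdigit c then pvARev rest (c :: digits)
      else if digits ≠ [] then digits
      else pvARev rest digits

def numeric_sort_key_py (name : String) : String × Int :=
  let digits := pvARev name.toList.reverse []
  if digits ≠ [] then
    -- int(digits): digits is a nonempty all-digit string, so ofChars? always returns a value
    (String.ofList (pvRstripChars name.toList digits), (PySem.Int.ofChars? digits).getD 0)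
  else (name, -1)

-- ===== PORT B =====
-- B's loop: forward pass collecting maximal digit runs
def pvRuns (l : List Char) (cur : List Char) (runs : List (List Char)) : List (List Char) :=
  match l with
  | [] => if cur ≠ [] then runs ++ [cur] else runs
  | c :: rest =>
      if PySem.Chars.isdigit c then pvRuns rest (cur ++ [c]) runs
      else pvRuns rest [] (if cur ≠ [] then runs ++ [cur] else runs)

def numeric_sort_key_py_alt (name : String) : String × Int :=
  let runs := pvRuns name.toList [] []
  match runs.getLast? with
  | some digits =>
      (String.ofList (pvRstripChars name.toList digits), (PySem.Int.ofChars? digits).getD 0)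
  | none => (name, -1)

-- ===== PRECONDITION & SPEC =====
def Spec_numeric_sort_key_py (name : String) (out : String × Int) : Prop := out = numeric_sort_key_py_alt name
instance (name : String) (out : String × Int) : Decidable (Spec_numeric_sort_key_py name out) := by unfold Spec_numeric_sort_key_py; infer_instance

-- ===== CLAIM (what is proved, stated in full; the proofs are below) =====
def Claim_equal_numeric_sort_key_py : Prop := ∀ (name : String), Dom_numeric_sort_key_py name → Spec_numeric_sort_key_py name (numeric_sort_key_py name)

-- ===== LEMMAS AND PROOFS =====

-- notation shortcuts used only in proofs
def pvD (c : Char) : Bool := PySem.Chars.isdigit c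
-- the last maximal digit run of s, read off s.reverse
def pvH (s : List Char) : List Char :=
  (s.reverse.dropWhile (fun c => !pvD c)).takeWhile pvD

lemma pvARev_acc (l acc : List Char) (h : acc ≠ []) :
    pvARev l acc = (l.takeWhile pvD).reverse ++ acc := by
  induction l generalizing acc with
  | nil => simp [pvARev]
  | cons c rest ih =>
      by_cases hc : PySem.Chars.isdigit c = true
      · rw [show pvARev (c :: rest) acc = pvARev rest (c :: acc) by simp [pvARev, hc]]
        rw [ih (c :: acc) (by simp)]
        simp [List.takeWhile_cons, pvD, hc]
      · rw [show pvARev (c :: rest) acc = acc by simp [pvARev, hc, h]]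
        simp [List.takeWhile_cons, pvD, hc]

lemma pvARev_nil (l : List Char) :
    pvARev l [] = ((l.dropWhile (fun c => !pvD c)).takeWhile pvD).reverse := by
  induction l with
  | nil => simp [pvARev]
  | cons c rest ih =>
      by_cases hc : PySem.Chars.isdigit c = true
      · rw [show pvARev (c :: rest) [] = pvARev rest [c] by simp [pvARev, hc]]
        rw [pvARev_acc rest [c] (by simp)]
        simp [List.dropWhile_cons, List.takeWhile_cons, pvD, hc]
      · rw [show pvARev (c :: rest) [] = pvARev rest [] by simp [pvARev, hc]]
        rw [ih]
        simp [List.dropWhile_cons, pvD, hc]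

lemma takeWhile_append_not {p : Char → Bool} (x y : List Char) (c : Char) (hc : p c = false) :
    (x ++ c :: y).takeWhile p = x.takeWhile p := by
  induction x with
  | nil => simp [List.takeWhile_cons, hc]
  | cons a x ih =>
      by_cases ha : p a = true
      · simp [List.takeWhile_cons, ha, ih]
      · simp [List.takeWhile_cons, ha]

lemma dropWhile_append_ne {p : Char → Bool} (x y : List Char) (h : x.dropWhile p ≠ []) :
    (x ++ y).dropWhile p = x.dropWhile p ++ y := by
  induction x with
  | nil => simp at h
  | cons a x ih =>
      by_cases ha : p a = true
      · have h' : x.dropWhile p ≠ [] := by simpa [List.dropWhile_cons, ha] using h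
        simp [List.dropWhile_cons, ha, ih h']
      · simp [List.dropWhile_cons, ha]

lemma dropWhile_append_all {p : Char → Bool} (x y : List Char) (h : x.dropWhile p = []) :
    (x ++ y).dropWhile p = y.dropWhile p := by
  induction x with
  | nil => simp
  | cons a x ih =>
      by_cases ha : p a = true
      · have h' : x.dropWhile p = [] := by simpa [List.dropWhile_cons, ha] using h
        simp [List.dropWhile_cons, ha, ih h']
      · simp [List.dropWhile_cons, ha] at h

lemma all_dropWhile_not (l : List Char) (h : l.all pvD = true) :
    l.dropWhile (fun c => !pvD c) = l := by
  cases l with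
  | nil => rfl
  | cons a l =>
      rw [List.all_cons, Bool.and_eq_true] at h
      simp [List.dropWhile_cons, h.1]

lemma all_takeWhile (l : List Char) (h : l.all pvD = true) :
    l.takeWhile pvD = l := by
  induction l with
  | nil => rfl
  | cons a l ih =>
      rw [List.all_cons, Bool.and_eq_true] at h
      simp [List.takeWhile_cons, h.1, ih h.2]

lemma pvH_all_digits (cur : List Char) (h : cur.all pvD = true) :
    pvH cur = cur.reverse := by
  have h' : cur.reverse.all pvD = true := by simpa using h
  unfold pvH
  rw [all_dropWhile_not _ h', all_takeWhile _ h']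

lemma pvH_eq_nil_iff (s : List Char) :
    pvH s = [] ↔ s.reverse.dropWhile (fun c => !pvD c) = [] := by
  unfold pvH
  cases hd : s.reverse.dropWhile (fun c => !pvD c) with
  | nil => simp
  | cons a l =>
      have hne : s.reverse.dropWhile (fun c => !pvD c) ≠ [] := by simp [hd]
      have h0 := List.head_dropWhile_not (fun c => !pvD c) hne
      have ha : pvD a = true := by
        have he : ((s.reverse.dropWhile (fun c => !pvD c)).head hne) = a := by
          simp [hd]
        rw [he] at h0
        simpa using h0
      simp [List.takeWhile_cons, ha]

-- main invariant for B's loop: the last element of the accumulated runs list is the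
-- last maximal digit run of cur ++ s (cur being the digit run in progress)
lemma pvRuns_inv (s : List Char) :
    ∀ (cur : List Char) (runs : List (List Char)), cur.all pvD = true →
    (pvRuns s cur runs).getLast? =
      if pvH (cur ++ s) = [] then runs.getLast? else some (pvH (cur ++ s)).reverse := by
  induction s with
  | nil =>
      intro cur runs h
      rw [show pvRuns [] cur runs = if cur ≠ [] then runs ++ [cur] else runs from rfl]
      rw [List.append_nil, pvH_all_digits cur h]
      by_cases hc : cur = []
      · simp [hc]
      · simp [hc, List.getLast?_concat]
  | cons c rest ih =>
      intro cur runs h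
      by_cases hc : PySem.Chars.isdigit c = true
      · rw [show pvRuns (c :: rest) cur runs = pvRuns rest (cur ++ [c]) runs by
          simp [pvRuns, hc]]
        rw [ih (cur ++ [c]) runs (by simp [List.all_append, h, List.all_cons, pvD, hc])]
        rw [show cur ++ c :: rest = (cur ++ [c]) ++ rest by simp]
      · rw [show pvRuns (c :: rest) cur runs
              = pvRuns rest [] (if cur ≠ [] then runs ++ [cur] else runs) by
          simp [pvRuns, hc]]
        rw [ih [] _ (by simp)]
        simp only [List.nil_append]
        have hpvdc : pvD c = false := by simp [pvD, hc]
        by_cases hr : pvH rest = []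
        · have hd : rest.reverse.dropWhile (fun x => !pvD x) = [] :=
            (pvH_eq_nil_iff rest).mp hr
          have hwhole : pvH (cur ++ c :: rest) = cur.reverse := by
            unfold pvH
            rw [show (cur ++ c :: rest).reverse = rest.reverse ++ c :: cur.reverse by simp]
            rw [dropWhile_append_all _ _ hd]
            rw [show List.dropWhile (fun x => !pvD x) (c :: cur.reverse)
                  = List.dropWhile (fun x => !pvD x) cur.reverse by
              simp [List.dropWhile_cons, hpvdc]]
            have h' : cur.reverse.all pvD = true := by simpa using h
            rw [all_dropWhile_not _ h', all_takeWhile _ h']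
          rw [hwhole, if_pos hr]
          by_cases hcur : cur = []
          · simp [hcur]
          · simp [hcur, List.getLast?_concat]
        · have hd : rest.reverse.dropWhile (fun x => !pvD x) ≠ [] := by
            intro hcontra
            exact hr ((pvH_eq_nil_iff rest).mpr hcontra)
          have hwhole : pvH (cur ++ c :: rest) = pvH rest := by
            unfold pvH
            rw [show (cur ++ c :: rest).reverse = rest.reverse ++ c :: cur.reverse by simp]
            rw [dropWhile_append_ne _ _ hd]
            exact takeWhile_append_not _ _ c hpvdc
          rw [hwhole, if_neg hr, if_neg hr]

lemma digits_eq (s : List Char) :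
    (pvRuns s [] []).getLast? =
      if pvARev s.reverse [] = [] then none else some (pvARev s.reverse []) := by
  have hA : pvARev s.reverse [] = (pvH s).reverse := by
    rw [pvARev_nil]; rfl
  have hinv := pvRuns_inv s [] [] (by simp)
  rw [List.nil_append] at hinv
  rw [hinv, hA]
  by_cases hn : pvH s = []
  · simp [hn]
  · simp [hn]

-- ===== VERDICT (by name: the statement is the Claim_ definition above) =====
theorem numeric_sort_key_py_spec : Claim_equal_numeric_sort_key_py := by
  intro name _
  unfold Spec_numeric_sort_key_py numeric_sort_key_py numeric_sort_key_py_alt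
  by_cases h : pvARev name.toList.reverse [] = []
  · simp [digits_eq, h]
  · simp [digits_eq, h]
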